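-- pv_equiv track=rewrite | github.com/MaximilianBohnert/Home_Verzeichnis | led_over_SPI.py | massage_erstellen
-- ===== SOURCE A (Python) =====
-- def massage_erstellen(LEDs):
-- 	msg = []
-- 	for farbe in LEDs:
--         	for farb_byte in farbe:
--                 	for bit in range(7,-1,-1):
--                         	if (farb_byte>>bit)&1 == 0:
--                                 	msg.append(0x80)
--                 	        else:
--               	                	msg.append(0xF8)
-- 	return msg
-- ===== SOURCE B (Python) =====
-- def massage_erstellen(LEDs):
--     # Precomputed 256-entry table: one flattening comprehension instead of a per-bit inner loop.
--     LUT = [[0xF8 if (i >> bit) & 1 else 0x80 for bit in range(7, -1, -1)] for i in range(256)]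
--     return [level for farbe in LEDs for farb_byte in farbe for level in LUT[farb_byte % 256]]
-- ===== Notes on version B (the rewrite author's own statement) =====
-- stated objective: faster
-- what changed: Replaces the per-bit inner loop and repeated append with a precomputed 256-entry lookup table and a single flattening comprehension over the table rows.
import Mathlib
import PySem

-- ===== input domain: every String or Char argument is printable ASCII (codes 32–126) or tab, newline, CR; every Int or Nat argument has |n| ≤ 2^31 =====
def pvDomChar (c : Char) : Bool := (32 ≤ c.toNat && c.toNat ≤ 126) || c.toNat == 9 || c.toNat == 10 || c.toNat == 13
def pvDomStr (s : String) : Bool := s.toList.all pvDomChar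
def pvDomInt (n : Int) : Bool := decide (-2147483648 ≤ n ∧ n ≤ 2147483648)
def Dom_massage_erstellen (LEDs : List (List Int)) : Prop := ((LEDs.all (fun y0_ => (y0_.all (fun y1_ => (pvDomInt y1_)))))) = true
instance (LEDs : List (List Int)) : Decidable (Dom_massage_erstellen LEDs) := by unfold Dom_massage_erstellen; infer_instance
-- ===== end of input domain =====

-- B replaces A's per-bit inner loop with a precomputed 256-entry lookup table and one
-- flattening comprehension (objective: faster by a constant factor).

-- ===== PORT A =====
-- Literal port of A's three nested loops with list append.
-- Python's i >> bit is Lean's >>> with a Nat shift; the bits from range(7,-1,-1) are 0..7,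
-- so bit.toNat is exact here.
def massage_erstellen (LEDs : List (List Int)) : List Int :=
  LEDs.foldl (fun (msg : List Int) (farbe : List Int) =>
    farbe.foldl (fun (msg : List Int) (farb_byte : Int) =>
      (PySem.List.pyRange 7 (-1) (-1)).foldl (fun (msg : List Int) (bit : Int) =>
        if PySem.Int.band (farb_byte >>> bit.toNat) 1 == 0 then msg ++ [0x80]
        else msg ++ [0xF8]) msg) msg) []

-- ===== PORT B =====
-- The 256-entry table from Source B; row i lists the 8 SPI levels of byte i, MSB first.
def pvLUT : List (List Int) :=
  (List.range 256).map (fun (i : Nat) =>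
    (PySem.List.pyRange 7 (-1) (-1)).map (fun (bit : Int) =>
      if PySem.Int.band (((i : Nat) : Int) >>> bit.toNat) 1 ≠ 0 then 0xF8 else 0x80))

-- Source B's flattening comprehension; LUT[farb_byte % 256] is always in range, so getD is exact.
def massage_erstellen_alt (LEDs : List (List Int)) : List Int :=
  LEDs.flatMap (fun farbe =>
    farbe.flatMap (fun farb_byte =>
      pvLUT.getD (PySem.Int.mod farb_byte 256).toNat []))

-- ===== PRECONDITION & SPEC =====
def Spec_massage_erstellen (LEDs : List (List Int)) (out : List Int) : Prop := out = massage_erstellen_alt LEDs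
instance (LEDs : List (List Int)) (out : List Int) : Decidable (Spec_massage_erstellen LEDs out) := by unfold Spec_massage_erstellen; infer_instance

-- ===== CLAIM (what is proved, stated in full; the proofs are below) =====
def Claim_equal_massage_erstellen : Prop := ∀ (LEDs : List (List Int)), Dom_massage_erstellen LEDs → Spec_massage_erstellen LEDs (massage_erstellen LEDs)

-- ===== LEMMAS AND PROOFS =====

-- A's per-bit append, packaged as a list-valued step.
def pvStep (b bit : Int) : List Int :=
  if PySem.Int.band (b >>> bit.toNat) 1 == 0 then [0x80] else [0xF8]

theorem pv_fold_append (g : Int → List Int) (l acc : List Int) :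
    l.foldl (fun m x => m ++ g x) acc = acc ++ l.flatMap g := by
  induction l generalizing acc with
  | nil => simp
  | cons x rest ih => simp [List.foldl_cons, ih]

-- The tested bit only depends on the byte's residue mod 256 (bits 0..7).
theorem pv_bit_mod (b : Int) (k : Nat) (hk : k < 8) :
    PySem.Int.band (b >>> k) 1 = PySem.Int.band ((b % 256) >>> k) 1 := by
  rw [PySem.Int.band_one, PySem.Int.band_one]
  simp only [PySem.Int.mod, Int.fmod_eq_emod]
  rw [Int.shiftRight_eq_div_pow, Int.shiftRight_eq_div_pow]
  push_cast
  interval_cases k <;> norm_num <;> omega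

theorem pv_singleton (c : Int) :
    (if c == 0 then ([0x80] : List Int) else [0xF8]) = [if c ≠ 0 then 0xF8 else 0x80] := by
  by_cases h : c = 0 <;> simp [h]

-- A's inner 8-bit loop equals appending B's table row for the byte's residue.
theorem pv_byte (b : Int) (acc : List Int) :
    (PySem.List.pyRange 7 (-1) (-1)).foldl (fun (msg : List Int) (bit : Int) =>
        if PySem.Int.band (b >>> bit.toNat) 1 == 0 then msg ++ [0x80]
        else msg ++ [0xF8]) acc
      = acc ++ pvLUT.getD (PySem.Int.mod b 256).toNat [] := by
  have hmod : PySem.Int.mod b 256 = b % 256 := by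
    simp [PySem.Int.mod, Int.fmod_eq_emod]
  have h0 : (0:Int) <= b % 256 := Int.emod_nonneg b (by norm_num)
  have hlt : b % 256 < 256 := Int.emod_lt_of_pos b (by norm_num)
  have hn : (b % 256).toNat < 256 := by omega
  have hcast : ((b % 256).toNat : Int) = b % 256 := Int.toNat_of_nonneg h0
  have hr : PySem.List.pyRange 7 (-1) (-1) = [7,6,5,4,3,2,1,0] := by decide
  have hfun : (fun (msg : List Int) (bit : Int) =>
      if PySem.Int.band (b >>> bit.toNat) 1 == 0 then msg ++ [0x80] else msg ++ [0xF8])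
      = fun msg bit => msg ++ pvStep b bit := by
    funext msg bit; unfold pvStep; split <;> rfl
  rw [hfun, pv_fold_append, hmod]
  congr 1
  have hlut : pvLUT.getD (b % 256).toNat []
      = (PySem.List.pyRange 7 (-1) (-1)).map (fun (bit : Int) =>
          if PySem.Int.band ((((b % 256).toNat : Nat) : Int) >>> bit.toNat) 1 ≠ 0 then 0xF8 else 0x80) := by
    simp only [pvLUT, List.getD_eq_getElem?_getD, List.getElem?_map, List.getElem?_range, hn,
      Option.map_some, Option.getD_some]
  rw [hlut, hr]
  simp only [List.flatMap_cons, List.flatMap_nil, List.map_cons, List.map_nil, pvStep, hcast]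
  simp only [show (7:Int).toNat = 7 from rfl, show (6:Int).toNat = 6 from rfl,
    show (5:Int).toNat = 5 from rfl, show (4:Int).toNat = 4 from rfl,
    show (3:Int).toNat = 3 from rfl, show (2:Int).toNat = 2 from rfl,
    show (1:Int).toNat = 1 from rfl, show (0:Int).toNat = 0 from rfl]
  rw [pv_bit_mod b 7 (by norm_num), pv_bit_mod b 6 (by norm_num), pv_bit_mod b 5 (by norm_num),
      pv_bit_mod b 4 (by norm_num), pv_bit_mod b 3 (by norm_num), pv_bit_mod b 2 (by norm_num),
      pv_bit_mod b 1 (by norm_num), pv_bit_mod b 0 (by norm_num)]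
  simp only [pv_singleton]
  simp

-- Folding A's per-byte step over a colour equals appending B's flatMap for that colour.
theorem pv_colour (farbe : List Int) (acc : List Int) :
    farbe.foldl (fun (msg : List Int) (farb_byte : Int) =>
      (PySem.List.pyRange 7 (-1) (-1)).foldl (fun (msg : List Int) (bit : Int) =>
        if PySem.Int.band (farb_byte >>> bit.toNat) 1 == 0 then msg ++ [0x80]
        else msg ++ [0xF8]) msg) acc
    = acc ++ farbe.flatMap (fun farb_byte => pvLUT.getD (PySem.Int.mod farb_byte 256).toNat []) := by
  induction farbe generalizing acc with
  | nil => simp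
  | cons b rest ih =>
      rw [List.foldl_cons, pv_byte, ih, List.flatMap_cons, List.append_assoc]

theorem pv_all (LEDs : List (List Int)) (acc : List Int) :
    LEDs.foldl (fun (msg : List Int) (farbe : List Int) =>
      farbe.foldl (fun (msg : List Int) (farb_byte : Int) =>
        (PySem.List.pyRange 7 (-1) (-1)).foldl (fun (msg : List Int) (bit : Int) =>
          if PySem.Int.band (farb_byte >>> bit.toNat) 1 == 0 then msg ++ [0x80]
          else msg ++ [0xF8]) msg) msg) acc
    = acc ++ massage_erstellen_alt LEDs := by
  induction LEDs generalizing acc with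
  | nil => simp [massage_erstellen_alt]
  | cons farbe rest ih =>
      rw [List.foldl_cons, pv_colour, ih]
      simp [massage_erstellen_alt, List.append_assoc]

-- ===== VERDICT (by name: the statement is the Claim_ definition above) =====
theorem massage_erstellen_spec : Claim_equal_massage_erstellen := by
  intro LEDs _
  unfold Spec_massage_erstellen massage_erstellen
  simpa using pv_all LEDs []
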